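-- pv_equiv track=rewrite | github.com/srinathalla/python | algo/dp/solution.py | removePalindromeSub
-- ===== SOURCE A (Python) =====
-- def removePalindromeSub(s: str) -> int:
--     if len(s) == 0:
--         return 0
--
--     def longestPalindromeSubseq(s: str) -> int:
--         dp = [[0 for j in range(len(s))] for i in range(len(s))]
--
--         for i in reversed(range(len(s))):
--             dp[i][i] = 1
--             for j in range(i + 1, len(s)):
--                 if s[i] == s[j]:
--                     dp[i][j] = dp[i+1][j-1] + 2
--                 else:
--                     dp[i][j] = max(dp[i][j-1], dp[i+1][j])
--
--         return dp[0][len(s)-1]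
--     return len(s) - longestPalindromeSubseq(s) + 1
-- ===== SOURCE B (Python) =====
-- def removePalindromeSub(s: str) -> int:
--     n = len(s)
--     if n == 0:
--         return 0
--     t = s[::-1]
--     prev = [0] * (n + 1)
--     for i in range(1, n + 1):
--         c = s[i - 1]
--         cur = [0] * (n + 1)
--         for j in range(1, n + 1):
--             if c == t[j - 1]:
--                 cur[j] = prev[j - 1] + 1
--             else:
--                 a = prev[j]
--                 b = cur[j - 1]
--                 cur[j] = a if a > b else b
--         prev = cur
--     return n - prev[n] + 1
-- ===== Notes on version B (the rewrite author's own statement) =====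
-- stated objective: alternative
-- what changed: Instead of the interval palindrome DP over substrings (outer index running backwards, diagonal fill), B computes the longest common subsequence of s with its reversal by a forward prefix-indexed LCS recurrence kept in two rolling rows, using the identity LPS(s) = LCS(s, reverse(s)), which is proved in Lean via a crossing argument on subsequence embeddings.
import Mathlib
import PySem

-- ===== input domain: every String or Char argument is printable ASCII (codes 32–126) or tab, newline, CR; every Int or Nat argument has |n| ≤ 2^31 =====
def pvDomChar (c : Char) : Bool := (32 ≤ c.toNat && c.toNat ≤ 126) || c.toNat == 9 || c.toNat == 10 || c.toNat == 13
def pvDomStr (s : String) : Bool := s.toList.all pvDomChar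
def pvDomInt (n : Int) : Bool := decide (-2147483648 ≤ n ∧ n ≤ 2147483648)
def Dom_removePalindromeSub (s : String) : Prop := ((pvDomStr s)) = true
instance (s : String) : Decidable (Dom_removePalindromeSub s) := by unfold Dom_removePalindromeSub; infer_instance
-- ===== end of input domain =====

-- B replaces A's interval palindrome DP by the LCS of s with its reversal (prefix-indexed
-- (n+1)×(n+1) table); the equivalence rests on the identity LPS(s) = LCS(s, reverse s),
-- proved below via a crossing argument on subsequence embeddings (alternative, same O(n^2) cost).

-- ===== PORT A =====

def pvGet2 (dp : List (List Int)) (i j : Nat) : Int := (dp.getD i []).getD j 0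

def pvSet2 (dp : List (List Int)) (i j : Nat) (v : Int) : List (List Int) :=
  dp.set i ((dp.getD i []).set j v)

def pvStepA (cs : List Char) (i : Nat) (dp : List (List Int)) (j : Nat) : List (List Int) :=
  if cs.getD i ' ' = cs.getD j ' ' then
    pvSet2 dp i j (pvGet2 dp (i+1) (j-1) + 2)
  else
    pvSet2 dp i j (max (pvGet2 dp i (j-1)) (pvGet2 dp (i+1) j))

def pvInnerA (cs : List Char) (n i : Nat) (dp : List (List Int)) : List (List Int) :=
  (List.range' (i+1) (n - (i+1))).foldl (pvStepA cs i) dp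

def pvOuterA (cs : List Char) (n : Nat) (dp : List (List Int)) (i : Nat) : List (List Int) :=
  pvInnerA cs n i (pvSet2 dp i i 1)

def removePalindromeSub (s : String) : Int :=
  let cs := s.toList
  let n := cs.length
  if n = 0 then 0
  else
    let dp0 : List (List Int) := List.replicate n (List.replicate n 0)
    let dp := ((List.range n).reverse).foldl (pvOuterA cs n) dp0
    (n : Int) - pvGet2 dp 0 (n-1) + 1


-- ===== PORT B =====
def pvInnerB (t : List Char) (c : Char) (n : Nat) (prev : List Int) : List Int :=
  (List.range' 1 n).foldl (fun cur j =>
    if c = t.getD (j-1) ' ' then cur.set j (prev.getD (j-1) 0 + 1)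
    else
      let a := prev.getD j 0
      let b := cur.getD (j-1) 0
      cur.set j (if b < a then a else b)) (List.replicate (n+1) 0)

def pvOuterB (cs ts : List Char) (n : Nat) (prev : List Int) (i : Nat) : List Int :=
  pvInnerB ts (cs.getD (i-1) ' ') n prev

def removePalindromeSub_alt (s : String) : Int :=
  let cs := s.toList
  let n := cs.length
  if n = 0 then 0
  else
    let ts := cs.reverse
    let prev := (List.range' 1 n).foldl (pvOuterB cs ts n) (List.replicate (n+1) 0)
    (n : Int) - prev.getD n 0 + 1

-- ===== PRECONDITION & SPEC =====
def Spec_removePalindromeSub (s : String) (out : Int) : Prop := out = removePalindromeSub_alt s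
instance (s : String) (out : Int) : Decidable (Spec_removePalindromeSub s out) := by unfold Spec_removePalindromeSub; infer_instance

-- ===== CLAIM (what is proved, stated in full; the proofs are below) =====
def Claim_equal_removePalindromeSub : Prop := ∀ (s : String), Dom_removePalindromeSub s → Spec_removePalindromeSub s (removePalindromeSub s)

-- ===== LEMMAS AND PROOFS =====

def pvLcsR (x y : List Char) : Nat :=
  match x, y with
  | [], _ => 0
  | _, [] => 0
  | a :: x', b :: y' =>
    if a = b then pvLcsR x' y' + 1
    else max (pvLcsR (a :: x') y') (pvLcsR x' (b :: y'))
termination_by x.length + y.length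
decreasing_by all_goals simp <;> omega

theorem pv_cons_sublist_tail {α : Type} {a c : α} {r l : List α}
    (h : (a :: r).Sublist (c :: l)) : r.Sublist l := by
  rcases List.sublist_cons_iff.mp h with h' | ⟨r', he, hr⟩
  · exact ((List.sublist_cons_self a r).trans h')
  · cases he; exact hr

theorem pv_cons_sublist_of_ne {α : Type} {a c : α} {r l : List α}
    (h : (a :: r).Sublist (c :: l)) (hne : a ≠ c) : (a :: r).Sublist l := by
  rcases List.sublist_cons_iff.mp h with h' | ⟨r', he, hr⟩
  · exact h'
  · injection he with h1 _
    exact absurd h1 hne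

theorem pvLcsR_wit (x y : List Char) :
    ∃ u : List Char, u.Sublist x ∧ u.Sublist y ∧ u.length = pvLcsR x y := by
  induction x, y using pvLcsR.induct with
  | case1 y => exact ⟨[], List.nil_sublist _, List.nil_sublist _, by simp [pvLcsR]⟩
  | case2 x h =>
    exact ⟨[], List.nil_sublist _, List.nil_sublist _, by cases x <;> simp [pvLcsR]⟩
  | case3 x' b y' ih =>
    obtain ⟨u, hx, hy, hl⟩ := ih
    exact ⟨b :: u, hx.cons₂ b, hy.cons₂ b, by simp [pvLcsR, hl]⟩
  | case4 a x' b y' hab ih1 ih2 =>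
    obtain ⟨u1, hx1, hy1, hl1⟩ := ih1
    obtain ⟨u2, hx2, hy2, hl2⟩ := ih2
    rcases le_total (pvLcsR (a :: x') y') (pvLcsR x' (b :: y')) with hle | hle
    · exact ⟨u2, hx2.trans (List.sublist_cons_self a x'), hy2,
        by simp [pvLcsR, hab, hl2, Nat.max_eq_right hle]⟩
    · exact ⟨u1, hx1, hy1.trans (List.sublist_cons_self b y'),
        by simp [pvLcsR, hab, hl1, Nat.max_eq_left hle]⟩

theorem pvLcsR_ub (x y : List Char) (u : List Char)
    (hx : u.Sublist x) (hy : u.Sublist y) : u.length ≤ pvLcsR x y := by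
  induction x, y using pvLcsR.induct generalizing u with
  | case1 y => rw [List.sublist_nil.mp hx]; simp
  | case2 x h => rw [List.sublist_nil.mp hy]; simp
  | case3 x' b y' ih =>
    simp only [pvLcsR]
    cases u with
    | nil => simp
    | cons e u' =>
      rcases List.sublist_cons_iff.mp hy with hy' | ⟨r, he, hr⟩
      · rcases List.sublist_cons_iff.mp hx with hx' | ⟨r, he, hr⟩
        · exact (ih _ hx' hy').trans (Nat.le_succ _)
        · cases he
          have : u'.Sublist y' := (List.sublist_cons_self b u').trans hy'
          simpa using Nat.succ_le_succ (ih u' hr this)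
      · cases he
        simpa using Nat.succ_le_succ (ih u' (pv_cons_sublist_tail hx) hr)
  | case4 a x' b y' hab ih1 ih2 =>
    simp only [pvLcsR, if_neg hab]
    rcases List.sublist_cons_iff.mp hy with hy' | ⟨r, he, hr⟩
    · exact le_max_of_le_left (ih1 u hx hy')
    · subst he
      have : (b :: r).Sublist x' := pv_cons_sublist_of_ne hx (fun h => hab h.symm)
      exact le_max_of_le_right (ih2 _ this hy)

theorem pv_palin_of_selfrev (s u : List Char) (hu : u.Sublist s) (hv : u.reverse.Sublist s) :
    ∃ p : List Char, p.Sublist s ∧ p.reverse = p ∧ u.length ≤ p.length := by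
  obtain ⟨I, hI, hIpw⟩ := List.sublist_eq_map_getElem hu
  obtain ⟨P, hP, hPpw⟩ := List.sublist_eq_map_getElem hv
  set g : Fin s.length → Char := fun x => s[x] with hg
  set k := u.length with hk
  have hIlen : I.length = k := by rw [hk, hI, List.length_map]
  have hJ : u = P.reverse.map g := by
    rw [List.map_reverse, ← hP, List.reverse_reverse]
  set J := P.reverse with hJdef
  have hJlen : J.length = k := by rw [hk, hJ, List.length_map]
  have hJpw : J.Pairwise (fun x1 x2 => x2 < x1) := List.pairwise_reverse.mpr hPpw
  have hIlt : ∀ {t : ℕ}, t < k → t < I.length := fun h => by omega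
  have hJlt : ∀ {t : ℕ}, t < k → t < J.length := fun h => by omega
  have hImono : ∀ t t' (ht' : t' < k) (htt : t < t'),
      (I[t]'(hIlt (htt.trans ht'))).val < (I[t']'(hIlt ht')).val := by
    intro t t' ht' htt
    exact List.pairwise_iff_getElem.mp hIpw t t' (hIlt (htt.trans ht')) (hIlt ht') htt
  have hJanti : ∀ t t' (ht' : t' < k) (htt : t < t'),
      (J[t']'(hJlt ht')).val < (J[t]'(hJlt (htt.trans ht'))).val := by
    intro t t' ht' htt
    exact List.pairwise_iff_getElem.mp hJpw t t' (hJlt (htt.trans ht')) (hJlt ht') htt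
  have tail_build : ∀ m0 : ℕ, m0 ≤ k →
      (∀ t (ht : t < k), m0 ≤ t → (J[t]'(hJlt ht)).val < (I[t]'(hIlt ht)).val) →
      ∃ p : List Char, p.Sublist s ∧ p.reverse = p ∧ p.length = 2 * (k - m0) := by
    intro m0 hm0 hlt
    refine ⟨((J.drop m0).reverse ++ I.drop m0).map g, ?_, ?_, ?_⟩
    · apply List.map_getElem_sublist
      rw [List.pairwise_append]
      refine ⟨List.pairwise_reverse.mpr (List.Pairwise.sublist (List.drop_sublist _ _) hJpw), ?_, ?_⟩
      · exact List.Pairwise.sublist (List.drop_sublist _ _) hIpw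
      · intro x hx y hy
        rw [List.mem_reverse, List.mem_iff_getElem] at hx
        rw [List.mem_iff_getElem] at hy
        obtain ⟨t0, ht0, hx⟩ := hx
        obtain ⟨t1, ht1, hy⟩ := hy
        rw [List.getElem_drop] at hx hy
        have ht0k : m0 + t0 < k := by simp [hJlen] at ht0; omega
        have ht1k : m0 + t1 < k := by simp [hIlen] at ht1; omega
        subst hx hy
        rw [Fin.lt_def]
        rcases Nat.lt_or_ge t0 t1 with hlt' | hle
        · have h1 := hlt _ ht0k (by omega)
          have h2 := hImono (m0 + t0) (m0 + t1) ht1k (by omega)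
          omega
        · rcases Nat.eq_or_lt_of_le hle with heq | hlt''
          · subst heq; exact hlt _ ht0k (by omega)
          · have h1 := hJanti (m0 + t1) (m0 + t0) ht0k (by omega)
            have h2 := hlt _ ht1k (by omega)
            omega
    · have hmapJ : (J.drop m0).map g = u.drop m0 := by
        rw [List.map_drop, ← hJ]
      have hmapI : (I.drop m0).map g = u.drop m0 := by
        rw [List.map_drop, ← hI]
      rw [List.map_append, List.map_reverse, hmapJ, hmapI]
      simp
    · simp [hIlen, hJlen]; omega
  have havget : ∀ t (ht : t < k), (I.map Fin.val).getD t 0 = (I[t]'(hIlt ht)).val := by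
    intro t ht
    simp [List.getD_eq_getElem?_getD, List.getElem?_map, List.getElem?_eq_getElem (hIlt ht)]
  have hbvget : ∀ t (ht : t < k), (J.map Fin.val).getD t 0 = (J[t]'(hJlt ht)).val := by
    intro t ht
    simp [List.getD_eq_getElem?_getD, List.getElem?_map, List.getElem?_eq_getElem (hJlt ht)]
  by_cases hc : ∃ t, ∃ ht : t < k, (I[t]'(hIlt ht)).val ≤ (J[t]'(hJlt ht)).val
  · obtain ⟨t0, ht0, hct0⟩ := hc
    have hk1 : 1 ≤ k := by omega
    set m := Nat.findGreatest
      (fun t => t < k ∧ (I.map Fin.val).getD t 0 ≤ (J.map Fin.val).getD t 0) (k - 1) with hm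
    have hQm : m < k ∧ (I.map Fin.val).getD m 0 ≤ (J.map Fin.val).getD m 0 := by
      rw [hm]
      exact Nat.findGreatest_spec
        (P := fun t => t < k ∧ (I.map Fin.val).getD t 0 ≤ (J.map Fin.val).getD t 0)
        (m := t0) (by omega)
        ⟨ht0, by rw [havget t0 ht0, hbvget t0 ht0]; exact hct0⟩
    have hmk : m < k := hQm.1
    have hIJm : (I[m]'(hIlt hmk)).val ≤ (J[m]'(hJlt hmk)).val := by
      have := hQm.2
      rwa [havget m hmk, hbvget m hmk] at this
    have hgt : ∀ t (ht : t < k), m < t → (J[t]'(hJlt ht)).val < (I[t]'(hIlt ht)).val := by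
      intro t ht hmt
      by_contra hcon
      rw [Nat.not_lt] at hcon
      exact Nat.findGreatest_is_greatest (hm ▸ hmt) (by omega)
        ⟨ht, by rw [havget t ht, hbvget t ht]; exact hcon⟩
    have front : ∃ p : List Char, p.Sublist s ∧ p.reverse = p ∧ p.length = 2 * m + 1 := by
      refine ⟨(I.take (m+1) ++ (J.take m).reverse).map g, ?_, ?_, ?_⟩
      · apply List.map_getElem_sublist
        rw [List.pairwise_append]
        refine ⟨List.Pairwise.sublist (List.take_sublist _ _) hIpw,
          List.pairwise_reverse.mpr (List.Pairwise.sublist (List.take_sublist _ _) hJpw), ?_⟩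
        intro x hx y hy
        rw [List.mem_iff_getElem] at hx
        rw [List.mem_reverse, List.mem_iff_getElem] at hy
        obtain ⟨t0, ht0, hx⟩ := hx
        obtain ⟨t1, ht1, hy⟩ := hy
        rw [List.getElem_take] at hx hy
        have ht0m : t0 ≤ m := by simp [hIlen] at ht0; omega
        have ht1m : t1 < m := by simp [hJlen] at ht1; omega
        subst hx hy
        rw [Fin.lt_def]
        have h1 : (I[t0]'(hIlt (by omega))).val ≤ (I[m]'(hIlt hmk)).val := by
          rcases Nat.eq_or_lt_of_le ht0m with heq | hlt'
          · subst heq; rfl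
          · exact le_of_lt (hImono t0 m hmk hlt')
        have h2 := hJanti t1 m hmk ht1m
        omega
      · have h1 : (I.take (m+1)).map g = u.take (m+1) := by rw [List.map_take, ← hI]
        have h2 : (J.take m).map g = u.take m := by rw [List.map_take, ← hJ]
        have h3 : u.take (m+1) = u.take m ++ [u[m]'hmk] := by
          rw [List.take_add_one, List.getElem?_eq_getElem hmk]
          rfl
        rw [List.map_append, List.map_reverse, h1, h2, h3]
        generalize List.take m u = w
        simp
      · simp [hIlen, hJlen]; omega
    obtain ⟨pf, hpf1, hpf2, hpf3⟩ := front
    obtain ⟨pt, hpt1, hpt2, hpt3⟩ :=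
      tail_build (m+1) (by omega) (fun t ht hmt => hgt t ht (by omega))
    rcases Nat.lt_or_ge (2 * m + 1) k with hcase | hcase
    · exact ⟨pt, hpt1, hpt2, by omega⟩
    · exact ⟨pf, hpf1, hpf2, by omega⟩
  · have hc' : ∀ t (ht : t < k), (J[t]'(hJlt ht)).val < (I[t]'(hIlt ht)).val := by
      intro t ht
      by_contra hcon
      rw [Nat.not_lt] at hcon
      exact hc ⟨t, ht, hcon⟩
    obtain ⟨p, h1, h2, h3⟩ := tail_build 0 (by omega) (fun t ht _ => hc' t ht)
    exact ⟨p, h1, h2, by omega⟩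

def pvLps (cs : List Char) (i j : Nat) : Int :=
  if _h1 : j < i then 0
  else if _h2 : i = j then 1
  else if cs.getD i ' ' = cs.getD j ' ' then pvLps cs (i+1) (j-1) + 2
  else max (pvLps cs i (j-1)) (pvLps cs (i+1) j)
termination_by j - i
decreasing_by all_goals omega

theorem pvLps_base_lt (cs : List Char) (i j : Nat) (h : j < i) : pvLps cs i j = 0 := by
  rw [pvLps]; simp [h]

theorem pvLps_base_eq (cs : List Char) (i : Nat) : pvLps cs i i = 1 := by
  rw [pvLps]; simp

theorem pvLps_step (cs : List Char) (i j : Nat) (h : i < j) :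
    pvLps cs i j = if cs.getD i ' ' = cs.getD j ' ' then pvLps cs (i+1) (j-1) + 2
                else max (pvLps cs i (j-1)) (pvLps cs (i+1) j) := by
  rw [pvLps]
  have h1 : ¬ j < i := by omega
  have h2 : i ≠ j := by omega
  simp [h1, h2]

theorem pvLps_nonneg (cs : List Char) (i j : Nat) : 0 ≤ pvLps cs i j := by
  induction i, j using pvLps.induct cs with
  | case1 i j h => rw [pvLps_base_lt cs i j h]
  | case2 j h1 => rw [pvLps_base_eq]; omega
  | case3 i j h1 h2 hc ih => rw [pvLps_step cs i j (by omega), if_pos hc]; omega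
  | case4 i j h1 h2 hc ih1 ih2 =>
    rw [pvLps_step cs i j (by omega), if_neg hc]
    exact le_max_of_le_left ih1

theorem pvLps_pos (cs : List Char) (i j : Nat) (hij : i ≤ j) : 1 ≤ pvLps cs i j := by
  induction i, j using pvLps.induct cs with
  | case1 i j h => omega
  | case2 j h1 => rw [pvLps_base_eq]
  | case3 i j h1 h2 hc ih =>
    rw [pvLps_step cs i j (by omega), if_pos hc]
    have := pvLps_nonneg cs (i+1) (j-1)
    omega
  | case4 i j h1 h2 hc ih1 ih2 =>
    rw [pvLps_step cs i j (by omega), if_neg hc]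
    exact le_max_of_le_right (ih2 (by omega))

-- slice cs[i..j] inclusive
def pvSlice (cs : List Char) (i j : Nat) : List Char := (cs.drop i).take (j + 1 - i)

theorem pvSlice_singleton (cs : List Char) (i : Nat) (h : i < cs.length) :
    pvSlice cs i i = [cs[i]] := by
  rw [pvSlice, show i + 1 - i = 1 by omega, List.drop_eq_getElem_cons h]
  rfl

theorem pvSlice_cons (cs : List Char) (i j : Nat) (hij : i < j) (hj : j < cs.length) :
    pvSlice cs i j = cs[i]'(by omega) :: pvSlice cs (i+1) j := by
  rw [pvSlice, List.drop_eq_getElem_cons (show i < cs.length by omega),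
    show j + 1 - i = (j - i) + 1 by omega, List.take_succ_cons, pvSlice,
    show j + 1 - (i+1) = j - i by omega]

theorem pvSlice_concat (cs : List Char) (i j : Nat) (hij : i ≤ j) (hj1 : 1 ≤ j)
    (hj : j < cs.length) :
    pvSlice cs i j = pvSlice cs i (j-1) ++ [cs[j]'hj] := by
  have hlt : j - i < (cs.drop i).length := by rw [List.length_drop]; omega
  rw [pvSlice, show j + 1 - i = (j - i) + 1 by omega, List.take_add_one,
    List.getElem?_eq_getElem hlt, List.getElem_drop, pvSlice,
    show j - 1 + 1 - i = j - i by omega]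
  simp only [show i + (j - i) = j from by omega]
  rfl

theorem pvSlice_decomp (cs : List Char) (i j : Nat) (hij : i < j) (hj : j < cs.length) :
    pvSlice cs i j = cs[i]'(by omega) :: (pvSlice cs (i+1) (j-1) ++ [cs[j]'hj]) := by
  rw [pvSlice_cons cs i j hij hj, pvSlice_concat cs (i+1) j hij (by omega) hj]

theorem pv_palindrome_decomp {p : List Char} (h2 : 2 ≤ p.length) (hpal : p.reverse = p) :
    ∃ e q, p = e :: q ++ [e] ∧ q.reverse = q := by
  cases p with
  | nil => simp at h2
  | cons e t =>
    have ht : t ≠ [] := by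
      cases t with
      | nil => simp at h2
      | cons _ _ => simp
    obtain ⟨q, x, hdec⟩ : ∃ q x, t = q ++ [x] :=
      ⟨t.dropLast, t.getLast ht, (List.dropLast_append_getLast ht).symm⟩
    subst hdec
    have hrev : x :: (q.reverse ++ [e]) = e :: (q ++ [x]) := by
      have := hpal
      simp only [List.reverse_cons, List.reverse_append, List.reverse_nil,
        List.nil_append, List.singleton_append] at this ⊢
      exact this
    injection hrev with h1 h2
    subst h1
    refine ⟨x, q, by simp, ?_⟩
    have h3 : q.reverse ++ [x] = q ++ [x] := h2
    exact List.append_cancel_right h3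

theorem pv_snoc_sublist_head {α : Type} {b d : α} {r l : List α}
    (h : (r ++ [b]).Sublist (l ++ [d])) : r.Sublist l := by
  have := h.reverse
  simp only [List.reverse_append, List.reverse_cons, List.reverse_nil, List.nil_append,
    List.singleton_append] at this
  exact List.reverse_sublist.mp (pv_cons_sublist_tail this)

theorem pv_snoc_sublist_of_ne {α : Type} {b d : α} {r l : List α}
    (h : (r ++ [b]).Sublist (l ++ [d])) (hne : b ≠ d) : (r ++ [b]).Sublist l := by
  have := h.reverse
  simp only [List.reverse_append, List.reverse_cons, List.reverse_nil, List.nil_append,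
    List.singleton_append] at this
  have h2 := pv_cons_sublist_of_ne this hne
  have h3 : (b :: r.reverse).reverse.Sublist l.reverse.reverse := h2.reverse
  simpa using h3

theorem pv_peel {a b c d : Char} {q m : List Char}
    (h : (a :: (q ++ [b])).Sublist (c :: (m ++ [d]))) : q.Sublist m :=
  pv_snoc_sublist_head (pv_cons_sublist_tail h)

theorem pvLps_spec (cs : List Char) : ∀ (d i j : Nat), j - i = d → i ≤ j → j < cs.length →
    (∃ p : List Char, p.Sublist (pvSlice cs i j) ∧ p.reverse = p ∧
      (p.length : ℤ) = pvLps cs i j) ∧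
    (∀ p : List Char, p.Sublist (pvSlice cs i j) → p.reverse = p →
      (p.length : ℤ) ≤ pvLps cs i j) := by
  intro d
  induction d using Nat.strong_induction_on with
  | _ d ih =>
    intro i j hd hij hjn
    rcases Nat.eq_or_lt_of_le hij with heq | hlt
    · -- i = j
      subst heq
      rw [pvSlice_singleton cs i hjn, pvLps_base_eq]
      constructor
      · exact ⟨[cs[i]'hjn], List.Sublist.refl _, rfl, by simp⟩
      · intro p hp _
        have := hp.length_le
        simp at this
        omega
    · -- i < j
      have hdecomp := pvSlice_decomp cs i j hlt hjn
      have hgetI : cs.getD i ' ' = cs[i]'(by omega) := List.getD_eq_getElem cs ' ' (by omega)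
      have hgetJ : cs.getD j ' ' = cs[j]'hjn := List.getD_eq_getElem cs ' ' hjn
      have midspec : (∃ q : List Char, q.Sublist (pvSlice cs (i+1) (j-1)) ∧ q.reverse = q ∧
            (q.length : ℤ) = pvLps cs (i+1) (j-1)) ∧
          (∀ q : List Char, q.Sublist (pvSlice cs (i+1) (j-1)) → q.reverse = q →
            (q.length : ℤ) ≤ pvLps cs (i+1) (j-1)) := by
        rcases Nat.lt_or_ge (j-1) (i+1) with hsm | hge
        · have hmid : pvSlice cs (i+1) (j-1) = [] := by
            rw [pvSlice, show j - 1 + 1 - (i+1) = 0 by omega, List.take_zero]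
          rw [hmid, pvLps_base_lt cs (i+1) (j-1) hsm]
          constructor
          · exact ⟨[], List.Sublist.refl _, rfl, by simp⟩
          · intro p hp _
            rw [List.sublist_nil.mp hp]
            simp
        · exact ih (j - 1 - (i+1)) (by omega) (i+1) (j-1) rfl (by omega) (by omega)
      by_cases hc : cs.getD i ' ' = cs.getD j ' '
      · -- equal end characters
        rw [pvLps_step cs i j hlt, if_pos hc]
        have hcc : cs[i]'(by omega) = cs[j]'hjn := by rw [← hgetI, ← hgetJ, hc]
        constructor
        · obtain ⟨q, hq1, hq2, hq3⟩ := midspec.1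
          refine ⟨cs[i]'(by omega) :: (q ++ [cs[j]'hjn]), ?_, ?_, ?_⟩
          · rw [hdecomp]
            exact ((hq1.append (List.Sublist.refl _)).cons₂ _)
          · rw [hcc]
            simp [hq2]
          · simp
            omega
        · intro p hp hpal
          rcases Nat.lt_or_ge p.length 2 with hsmall | hbig
          · have := pvLps_nonneg cs (i+1) (j-1)
            have : (p.length : ℤ) ≤ 2 := by omega
            omega
          · obtain ⟨e, q, rfl, hqpal⟩ := pv_palindrome_decomp hbig hpal
            rw [hdecomp] at hp
            have hqm := pv_peel hp
            have := midspec.2 q hqm hqpal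
            simp
            omega
      · -- different end characters
        rw [pvLps_step cs i j hlt, if_neg hc]
        have hconsS : pvSlice cs i j = cs[i]'(by omega) :: pvSlice cs (i+1) j :=
          pvSlice_cons cs i j hlt hjn
        have hconcatS : pvSlice cs i j = pvSlice cs i (j-1) ++ [cs[j]'hjn] :=
          pvSlice_concat cs i j (by omega) (by omega) hjn
        have spec1 := ih (j - 1 - i) (by omega) i (j-1) rfl (by omega) (by omega)
        have spec2 := ih (j - (i+1)) (by omega) (i+1) j rfl (by omega) hjn
        constructor
        · rcases le_total (pvLps cs i (j-1)) (pvLps cs (i+1) j) with hle | hle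
          · obtain ⟨p, hp1, hp2, hp3⟩ := spec2.1
            refine ⟨p, ?_, hp2, by rw [hp3, max_eq_right hle]⟩
            rw [hconsS]
            exact hp1.trans (List.sublist_cons_self _ _)
          · obtain ⟨p, hp1, hp2, hp3⟩ := spec1.1
            refine ⟨p, ?_, hp2, by rw [hp3, max_eq_left hle]⟩
            rw [hconcatS]
            exact hp1.trans (List.sublist_append_left _ _)
        · intro p hp hpal
          rcases Nat.lt_or_ge p.length 2 with hsmall | hbig
          · have h1 := pvLps_pos cs i (j-1) (by omega)
            have h2 : pvLps cs i (j-1) ≤ max (pvLps cs i (j-1)) (pvLps cs (i+1) j) :=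
              le_max_left _ _
            omega
          · obtain ⟨e, q, rfl, hqpal⟩ := pv_palindrome_decomp hbig hpal
            by_cases he : e = cs[i]'(by omega)
            · -- e ≠ cs[j], drop the last element of the slice
              have hne : e ≠ cs[j]'hjn := by
                rw [he]
                intro hcon
                exact hc (by rw [hgetI, hgetJ, hcon])
              rw [hconcatS] at hp
              have hp' : ((e :: q) ++ [e]).Sublist (pvSlice cs i (j-1)) := by
                apply pv_snoc_sublist_of_ne _ hne
                simpa using hp
              have := spec1.2 _ (by simpa using hp') hpal
              exact this.trans (le_max_left _ _)
            · rw [hconsS] at hp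
              have hp' := pv_cons_sublist_of_ne hp he
              have := spec2.2 _ hp' hpal
              exact this.trans (le_max_right _ _)
-- appended to m3 for testing
theorem pvSlice_full (cs : List Char) (hn : 1 ≤ cs.length) :
    pvSlice cs 0 (cs.length - 1) = cs := by
  rw [pvSlice, List.drop_zero, show cs.length - 1 + 1 - 0 = cs.length by omega,
    List.take_length]

theorem pv_lcs_eq_lps (cs : List Char) (hn : 1 ≤ cs.length) :
    (pvLcsR cs.reverse cs : ℤ) = pvLps cs 0 (cs.length - 1) := by
  have hspec := pvLps_spec cs (cs.length - 1) 0 (cs.length - 1) rfl (by omega) (by omega)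
  have hsl := pvSlice_full cs hn
  apply le_antisymm
  · obtain ⟨u, hurev, hu, hlen⟩ := pvLcsR_wit cs.reverse cs
    have hurev' : u.reverse.Sublist cs := by
      have := hurev.reverse
      rwa [List.reverse_reverse] at this
    obtain ⟨p, hp, hppal, hplen⟩ := pv_palin_of_selfrev cs u hu hurev'
    have hub := hspec.2 p (by rwa [hsl]) hppal
    omega
  · obtain ⟨p, hp, hppal, hplen⟩ := hspec.1
    rw [hsl] at hp
    have hprev : p.Sublist cs.reverse := by
      have := hp.reverse
      rwa [hppal] at this
    have := pvLcsR_ub cs.reverse cs p hprev hp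
    omega

-- ===== generic table lemmas =====
theorem pv_getD_set_eq {α : Type} (l : List α) (i j : Nat) (v d : α) :
    (l.set i v).getD j d = if i = j ∧ i < l.length then v else l.getD j d := by
  by_cases hij : i = j
  · subst hij
    by_cases hlen : i < l.length
    · simp [List.getD_eq_getElem?_getD, hlen]
    · rw [List.set_eq_of_length_le (by omega)]
      simp [hlen]
  · simp [List.getD_eq_getElem?_getD, List.getElem?_set_ne hij, hij]

theorem pv_getD_mem {α : Type} (l : List α) (i : Nat) (d : α) (h : i < l.length) :
    l.getD i d ∈ l := by
  rw [List.getD_eq_getElem l d h]; exact List.getElem_mem h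

theorem pv_getD_replicate {β : Type} (v d : β) (m i : Nat) (h : i < m) :
    (List.replicate m v).getD i d = v := by
  rw [List.getD_eq_getElem _ d (by simp [h])]
  simp

def ShapeOK (n : Nat) (dp : List (List Int)) : Prop :=
  dp.length = n ∧ ∀ r ∈ dp, r.length = n

theorem row_len {n : Nat} {dp : List (List Int)} (h : ShapeOK n dp) {i : Nat} (hi : i < n) :
    (dp.getD i []).length = n :=
  h.2 _ (pv_getD_mem dp i [] (by rw [h.1]; exact hi))

theorem shape_set2 {n : Nat} {dp : List (List Int)} (i j : Nat) (v : Int)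
    (h : ShapeOK n dp) : ShapeOK n (pvSet2 dp i j v) := by
  by_cases hi : i < dp.length
  · constructor
    · simp [pvSet2, h.1]
    · intro r hr
      rcases List.mem_or_eq_of_mem_set hr with hm | he
      · exact h.2 r hm
      · subst he
        rw [List.length_set]
        exact row_len h (h.1 ▸ hi)
  · unfold pvSet2
    rw [List.set_eq_of_length_le (by omega)]
    exact h

theorem get2_set2_same {n : Nat} {dp : List (List Int)} (i j : Nat) (v : Int)
    (h : ShapeOK n dp) (hi : i < n) (hj : j < n) :
    pvGet2 (pvSet2 dp i j v) i j = v := by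
  have hi' : i < dp.length := by rw [h.1]; exact hi
  have hj' : j < (dp.getD i []).length := by rw [row_len h hi]; exact hj
  unfold pvGet2 pvSet2
  rw [pv_getD_set_eq, if_pos ⟨rfl, hi'⟩, pv_getD_set_eq, if_pos ⟨rfl, hj'⟩]

theorem get2_set2_other {dp : List (List Int)} {i j i' j' : Nat} (v : Int)
    (h : i ≠ i' ∨ j ≠ j') :
    pvGet2 (pvSet2 dp i j v) i' j' = pvGet2 dp i' j' := by
  unfold pvGet2 pvSet2
  by_cases hii : i = i'
  · subst hii
    have hjj : j ≠ j' := by tauto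
    rw [pv_getD_set_eq]
    by_cases hlen : i < dp.length
    · rw [if_pos ⟨rfl, hlen⟩, pv_getD_set_eq, if_neg (fun hc => hjj hc.1)]
    · rw [if_neg (fun hc => hlen hc.2)]
  · rw [pv_getD_set_eq]
    simp [hii]

-- ===== A-side: interval-table invariant =====
def InInv (cs : List Char) (n k m : Nat) (dp : List (List Int)) : Prop :=
  ShapeOK n dp ∧
  (∀ i j, k < i → i < n → j < n → pvGet2 dp i j = pvLps cs i j) ∧
  (∀ j, j < n → pvGet2 dp k j = if k ≤ j ∧ j < m then pvLps cs k j else 0) ∧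
  (∀ i j, i < k → j < n → pvGet2 dp i j = 0)

def OutInv (cs : List Char) (n i0 : Nat) (dp : List (List Int)) : Prop :=
  ShapeOK n dp ∧
  (∀ i j, i0 ≤ i → i < n → j < n → pvGet2 dp i j = pvLps cs i j) ∧
  (∀ i j, i < i0 → j < n → pvGet2 dp i j = 0)

theorem inner_step (cs : List Char) (n k m : Nat) (dp : List (List Int))
    (hk : k < n) (hkm : k < m) (hm : m < n) (h : InInv cs n k m dp) :
    InInv cs n k (m+1) (pvStepA cs k dp m) := by
  obtain ⟨hsh, hup, hrow, hdown⟩ := h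
  have hval : pvStepA cs k dp m = pvSet2 dp k m (pvLps cs k m) := by
    unfold pvStepA
    rw [pvLps_step cs k m hkm]
    by_cases hc : cs.getD k ' ' = cs.getD m ' '
    · rw [if_pos hc, if_pos hc, hup (k+1) (m-1) (by omega) (by omega) (by omega)]
    · rw [if_neg hc, if_neg hc, hup (k+1) m (by omega) (by omega) hm,
        hrow (m-1) (by omega), if_pos (⟨by omega, by omega⟩ : k ≤ m - 1 ∧ m - 1 < m)]
  rw [hval]
  refine ⟨shape_set2 _ _ _ hsh, ?_, ?_, ?_⟩
  · intro i j hki hi hj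
    rw [get2_set2_other _ (Or.inl (by omega))]
    exact hup i j hki hi hj
  · intro j hj
    by_cases hjm : j = m
    · rw [hjm, get2_set2_same _ _ _ hsh hk hm,
        if_pos (⟨by omega, by omega⟩ : k ≤ m ∧ m < m + 1)]
    · rw [get2_set2_other _ (Or.inr (by omega))]
      rw [hrow j hj]
      by_cases h1 : k ≤ j ∧ j < m
      · simp only [if_pos h1, if_pos (by omega : k ≤ j ∧ j < m + 1)]
      · have h2 : ¬ (k ≤ j ∧ j < m + 1) := by omega
        simp only [if_neg h1, if_neg h2]
  · intro i j hik hj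
    rw [get2_set2_other _ (Or.inl (by omega))]
    exact hdown i j hik hj

theorem inner_fold (cs : List Char) (n k : Nat) (hk : k < n) :
    ∀ (c m : Nat) (dp : List (List Int)), k < m → m + c ≤ n → InInv cs n k m dp →
      InInv cs n k (m + c) ((List.range' m c).foldl (pvStepA cs k) dp) := by
  intro c
  induction c with
  | zero => intro m dp _ _ h; simpa using h
  | succ c ih =>
    intro m dp hkm hmc h
    rw [List.range'_succ, List.foldl_cons]
    have h1 := inner_step cs n k m dp hk hkm (by omega) h
    have := ih (m+1) (pvStepA cs k dp m) (by omega) (by omega) h1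
    have harith : m + 1 + c = m + (c + 1) := by omega
    rwa [harith] at this

theorem outer_step (cs : List Char) (n k : Nat) (dp : List (List Int))
    (hk : k < n) (h : OutInv cs n (k+1) dp) :
    OutInv cs n k (pvOuterA cs n dp k) := by
  unfold pvOuterA pvInnerA
  obtain ⟨hsh, hup, hdown⟩ := h
  have hstart : InInv cs n k (k+1) (pvSet2 dp k k 1) := by
    refine ⟨shape_set2 _ _ _ hsh, ?_, ?_, ?_⟩
    · intro i j hki hi hj
      rw [get2_set2_other _ (Or.inl (by omega))]
      exact hup i j (by omega) hi hj
    · intro j hj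
      by_cases hjk : j = k
      · rw [hjk, get2_set2_same _ _ _ hsh hk hk, pvLps_base_eq,
          if_pos (⟨le_rfl, by omega⟩ : k ≤ k ∧ k < k + 1)]
      · rw [get2_set2_other _ (Or.inr (by omega))]
        rw [hdown k j (by omega) hj]
        rw [if_neg (by omega : ¬ (k ≤ j ∧ j < k + 1))]
    · intro i j hik hj
      rw [get2_set2_other _ (Or.inl (by omega))]
      exact hdown i j (by omega) hj
  have hfold := inner_fold cs n k hk (n - (k+1)) (k+1) (pvSet2 dp k k 1)
    (by omega) (by omega) hstart
  have harith : k + 1 + (n - (k+1)) = n := by omega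
  rw [harith] at hfold
  obtain ⟨hsh', hup', hrow', hdown'⟩ := hfold
  refine ⟨hsh', ?_, ?_⟩
  · intro i j hki hi hj
    by_cases hik : i = k
    · rw [hik, hrow' j hj]
      by_cases hkj : k ≤ j
      · rw [if_pos ⟨hkj, hj⟩]
      · rw [if_neg (by omega : ¬ (k ≤ j ∧ j < n)), pvLps_base_lt cs k j (by omega)]
    · exact hup' i j (by omega) hi hj
  · exact hdown'

theorem outer_fold (cs : List Char) (n : Nat) :
    ∀ (k : Nat) (dp : List (List Int)), k ≤ n → OutInv cs n k dp →
      OutInv cs n 0 (((List.range k).reverse).foldl (pvOuterA cs n) dp) := by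
  intro k
  induction k with
  | zero => intro dp _ h; simpa using h
  | succ k ih =>
    intro dp hkn h
    rw [List.range_succ, List.reverse_append]
    simp only [List.reverse_singleton, List.singleton_append, List.foldl_cons]
    exact ih _ (by omega) (outer_step cs n k dp (by omega) h)

theorem A_result (cs : List Char) (n : Nat) (hn : n = cs.length) (h0 : n ≠ 0) :
    pvGet2 (((List.range n).reverse).foldl (pvOuterA cs n)
      (List.replicate n (List.replicate n 0))) 0 (n-1) = pvLps cs 0 (n-1) := by
  have hdp0 : OutInv cs n n (List.replicate n (List.replicate n 0)) := by
    refine ⟨⟨by simp, ?_⟩, ?_, ?_⟩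
    · intro r hr
      rw [List.eq_of_mem_replicate hr]
      simp
    · intro i j hni hi _; omega
    · intro i j hi hj
      unfold pvGet2
      rw [pv_getD_replicate _ _ _ _ (by omega), pv_getD_replicate _ _ _ _ hj]
  have h := outer_fold cs n n _ le_rfl hdp0
  exact h.2.1 0 (n-1) le_rfl (by omega) (by omega)

-- ===== B-side: rolling-row prefix-LCS invariant =====
def pvBCell (cs ts : List Char) (i j : Nat) : Int :=
  (pvLcsR ((cs.take i).reverse) ((ts.take j).reverse) : Int)

theorem pvLcsR_nil_left (y : List Char) : pvLcsR [] y = 0 := by simp [pvLcsR]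

theorem pvLcsR_nil_right (x : List Char) : pvLcsR x [] = 0 := by
  cases x <;> simp [pvLcsR]

theorem pvBCell_zero_left (cs ts : List Char) (j : Nat) : pvBCell cs ts 0 j = 0 := by
  simp [pvBCell, pvLcsR_nil_left]

theorem pvBCell_zero_right (cs ts : List Char) (i : Nat) : pvBCell cs ts i 0 = 0 := by
  simp [pvBCell, pvLcsR_nil_right]

theorem pv_take_reverse_cons (cs : List Char) (i : Nat) (h : i < cs.length) :
    (cs.take (i+1)).reverse = cs[i] :: (cs.take i).reverse := by
  rw [List.take_add_one, List.getElem?_eq_getElem h, List.reverse_append]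
  rfl

theorem pvBCell_step (cs ts : List Char) (i j : Nat) (hi : i < cs.length)
    (hj : j < ts.length) :
    pvBCell cs ts (i+1) (j+1) =
      if cs.getD i ' ' = ts.getD j ' ' then pvBCell cs ts i j + 1
      else max (pvBCell cs ts i (j+1)) (pvBCell cs ts (i+1) j) := by
  unfold pvBCell
  rw [List.getD_eq_getElem cs ' ' hi, List.getD_eq_getElem ts ' ' hj,
    pv_take_reverse_cons cs i hi, pv_take_reverse_cons ts j hj]
  by_cases hc : cs[i] = ts[j]
  · simp [pvLcsR, hc]
  · simp only [pvLcsR, if_neg hc]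
    push_cast
    exact max_comm _ _

theorem pv_if_lt_eq_max (a b : Int) : (if b < a then a else b) = max a b := by
  split_ifs <;> omega

-- prev holds row i of the virtual LCS table
def PrevInv (cs ts : List Char) (n i : Nat) (prev : List Int) : Prop :=
  prev.length = n + 1 ∧ ∀ j, j ≤ n → prev.getD j 0 = pvBCell cs ts i j

-- cur holds row i up to (but excluding) column m, zero beyond
def CurInv (cs ts : List Char) (n i m : Nat) (cur : List Int) : Prop :=
  cur.length = n + 1 ∧ ∀ j, j ≤ n → cur.getD j 0 = if j < m then pvBCell cs ts i j else 0

theorem inner_stepB (cs ts : List Char) (n i m : Nat) (prev cur : List Int)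
    (hcs : cs.length = n) (hts : ts.length = n)
    (hi1 : 1 ≤ i) (hin : i ≤ n) (hm1 : 1 ≤ m) (hmn : m ≤ n)
    (hprev : PrevInv cs ts n (i-1) prev) (hcur : CurInv cs ts n i m cur) :
    CurInv cs ts n i (m+1)
      (if cs.getD (i-1) ' ' = ts.getD (m-1) ' ' then cur.set m (prev.getD (m-1) 0 + 1)
       else cur.set m (if cur.getD (m-1) 0 < prev.getD m 0 then prev.getD m 0
                       else cur.getD (m-1) 0)) := by
  obtain ⟨hpl, hp⟩ := hprev
  obtain ⟨hcl, hc⟩ := hcur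
  have hstep := pvBCell_step cs ts (i-1) (m-1) (by omega) (by omega)
  rw [show i - 1 + 1 = i by omega, show m - 1 + 1 = m by omega] at hstep
  have hval : (if cs.getD (i-1) ' ' = ts.getD (m-1) ' '
        then cur.set m (prev.getD (m-1) 0 + 1)
        else cur.set m (if cur.getD (m-1) 0 < prev.getD m 0 then prev.getD m 0
                        else cur.getD (m-1) 0))
      = cur.set m (pvBCell cs ts i m) := by
    by_cases hcc : cs.getD (i-1) ' ' = ts.getD (m-1) ' '
    · rw [if_pos hcc, hstep, if_pos hcc, hp (m-1) (by omega)]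
    · rw [if_neg hcc, hstep, if_neg hcc, pv_if_lt_eq_max, hp m hmn,
        hc (m-1) (by omega), if_pos (by omega : m - 1 < m)]
  rw [hval]
  refine ⟨by rw [List.length_set]; exact hcl, ?_⟩
  intro j hj
  rw [pv_getD_set_eq]
  by_cases hjm : m = j
  · subst hjm
    rw [if_pos ⟨rfl, by omega⟩, if_pos (by omega)]
  · rw [if_neg (fun hcon => hjm hcon.1), hc j hj]
    by_cases h1 : j < m
    · rw [if_pos h1, if_pos (by omega)]
    · rw [if_neg h1, if_neg (by omega)]

theorem inner_foldB (cs ts : List Char) (n i : Nat)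
    (hcs : cs.length = n) (hts : ts.length = n) (hi1 : 1 ≤ i) (hin : i ≤ n)
    (prev : List Int) (hprev : PrevInv cs ts n (i-1) prev) :
    ∀ (c m : Nat) (cur : List Int), 1 ≤ m → m + c ≤ n + 1 →
      CurInv cs ts n i m cur →
      CurInv cs ts n i (m + c) ((List.range' m c).foldl (fun cur j =>
        if cs.getD (i-1) ' ' = ts.getD (j-1) ' ' then cur.set j (prev.getD (j-1) 0 + 1)
        else cur.set j (if cur.getD (j-1) 0 < prev.getD j 0 then prev.getD j 0
                        else cur.getD (j-1) 0)) cur) := by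
  intro c
  induction c with
  | zero => intro m cur _ _ h; simpa using h
  | succ c ihc =>
    intro m cur hm1 hmc h
    rw [List.range'_succ, List.foldl_cons]
    have h1 := inner_stepB cs ts n i m prev cur hcs hts hi1 hin hm1 (by omega) hprev h
    have := ihc (m+1) _ (by omega) (by omega) h1
    have harith : m + 1 + c = m + (c + 1) := by omega
    rwa [harith] at this

theorem outer_stepB (cs ts : List Char) (n i : Nat) (prev : List Int)
    (hcs : cs.length = n) (hts : ts.length = n) (hi1 : 1 ≤ i) (hin : i ≤ n)
    (hprev : PrevInv cs ts n (i-1) prev) :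
    PrevInv cs ts n i (pvOuterB cs ts n prev i) := by
  unfold pvOuterB pvInnerB
  have hcur0 : CurInv cs ts n i 1 (List.replicate (n+1) 0) := by
    refine ⟨by simp, ?_⟩
    intro j hj
    rw [pv_getD_replicate _ _ _ _ (by omega)]
    by_cases hj0 : j < 1
    · rw [if_pos hj0, show j = 0 by omega, pvBCell_zero_right]
    · rw [if_neg hj0]
  have hfold := inner_foldB cs ts n i hcs hts hi1 hin prev hprev n 1
    (List.replicate (n+1) 0) (by omega) (by omega) hcur0
  refine ⟨hfold.1, ?_⟩
  intro j hj
  rw [hfold.2 j hj, if_pos (by omega)]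

theorem outer_foldB (cs ts : List Char) (n : Nat)
    (hcs : cs.length = n) (hts : ts.length = n) :
    ∀ (c i0 : Nat) (prev : List Int), i0 + c ≤ n →
      PrevInv cs ts n i0 prev →
      PrevInv cs ts n (i0 + c) ((List.range' (i0+1) c).foldl (pvOuterB cs ts n) prev) := by
  intro c
  induction c with
  | zero => intro i0 prev _ h; simpa using h
  | succ c ihc =>
    intro i0 prev hic h
    rw [List.range'_succ, List.foldl_cons]
    have h1 : PrevInv cs ts n (i0+1) (pvOuterB cs ts n prev (i0+1)) := by
      have := outer_stepB cs ts n (i0+1) prev hcs hts (by omega) (by omega)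
        (by simpa using h)
      simpa using this
    have := ihc (i0+1) _ (by omega) h1
    have harith : i0 + 1 + c = i0 + (c + 1) := by omega
    rwa [harith] at this

theorem B_result (cs : List Char) (n : Nat) (hn : n = cs.length) :
    ((List.range' 1 n).foldl (pvOuterB cs cs.reverse n) (List.replicate (n+1) 0)).getD n 0
      = (pvLcsR cs.reverse cs : Int) := by
  have hts : cs.reverse.length = n := by simp [hn]
  have hinit : PrevInv cs cs.reverse n 0 (List.replicate (n+1) 0) := by
    refine ⟨by simp, ?_⟩
    intro j hj
    rw [pv_getD_replicate _ _ _ _ (by omega), pvBCell_zero_left]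
  have hfold := outer_foldB cs cs.reverse n (by omega) hts n 0 _ (by omega) hinit
  rw [show (0:ℕ) + 1 = 1 from rfl, show (0:ℕ) + n = n by omega] at hfold
  rw [hfold.2 n (by omega), pvBCell,
    show cs.take n = cs by rw [hn]; exact List.take_length,
    show cs.reverse.take n = cs.reverse by rw [← hts]; exact List.take_length,
    List.reverse_reverse]

-- ===== VERDICT (by name: the statement is the Claim_ definition above) =====
theorem removePalindromeSub_spec : Claim_equal_removePalindromeSub := by
  intro s _
  unfold Spec_removePalindromeSub removePalindromeSub removePalindromeSub_alt
  by_cases h0 : s.toList.length = 0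
  · simp [h0]
  · simp only [h0]
    rw [A_result s.toList s.toList.length rfl h0, B_result s.toList s.toList.length rfl,
      pv_lcs_eq_lps s.toList (by omega)]
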